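-- pv_equiv track=rewrite | github.com/h0353914/SemcCameraUI | tools_App/compare_java_smali.py | _sort_instructions_within_basic_blocks
-- ===== SOURCE A (Python) =====
-- _BB_TERMINATOR_PREFIXES = (
--     "goto",
--     "if-",
--     "return",
--     "return-void",
--     "return-object",
--     "return-wide",
--     "throw",
--     "NORM_SWITCH",
-- )
--
-- def _sort_instructions_within_basic_blocks(instrs: list[str]) -> list[str]:
--     """將每個基本塊內的非標籤、非終端指令按字母排序。
--
--     保留控制流結構（標籤在前、分支/回傳在後），
--     僅重排中間的獨立運算指令。
--     兩側編譯器可能對同一基本塊內的指令排列不同，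
--     排序後可規範化此差異。
--
--     回傳排序後的指令列表（不做暫存器正規化，由呼叫端處理）。
--     """
--     blocks: list[list[str]] = []
--     cur: list[str] = []
--     for ins in instrs:
--         # 遇到標籤且當前塊有非標籤指令 → 開新塊
--         if ins.startswith(":") and cur and any(not l.startswith(":") for l in cur):
--             blocks.append(cur)
--             cur = []
--         cur.append(ins)
--     if cur:
--         blocks.append(cur)
--
--     result: list[str] = []
--     for bb in blocks:
--         labels = [l for l in bb if l.startswith(":")]
--         body = [l for l in bb if not l.startswith(":")]
--         if body and any(body[-1].startswith(p) for p in _BB_TERMINATOR_PREFIXES):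
--             mid = sorted(body[:-1])
--             result.extend(labels + mid + [body[-1]])
--         else:
--             result.extend(labels + sorted(body))
--     return result
-- ===== SOURCE B (Python) =====
-- _BB_TERMINATOR_PREFIXES = (
--     "goto",
--     "if-",
--     "return",
--     "return-void",
--     "return-object",
--     "return-wide",
--     "throw",
--     "NORM_SWITCH",
-- )
--
-- def _sort_instructions_within_basic_blocks(instrs):
--     # Decorate-sort-undecorate: give every instruction a schedule key computed
--     # LOCALLY (from itself, its predecessor and its successor) and do ONE global
--     # stable sort.  A block boundary is a label whose predecessor is a body
--     # instruction; a body instruction is block-final iff its successor is a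
--     # label (or it is the last instruction).  Key = (3*block + category, text):
--     # labels get category 0 (text "" so stability keeps their order), middle
--     # body category 1 (sorted by their own text), a terminator-prefixed
--     # block-final body instruction category 2.
--     decorated = []
--     block = 0
--     prev_body = False
--     for ins, nxt in zip(instrs, instrs[1:] + [":end"]):
--         is_label = ins.startswith(":")
--         if is_label and prev_body:
--             block += 1
--         if is_label:
--             key = (3 * block, "")
--         elif nxt.startswith(":") and ins.startswith(_BB_TERMINATOR_PREFIXES):
--             key = (3 * block + 2, "")
--         else:
--             key = (3 * block + 1, ins)
--         decorated.append((key, ins))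
--         prev_body = not is_label
--     return [ins for _, ins in sorted(decorated, key=lambda t: t[0])]
-- ===== Notes on version B (the rewrite author's own statement) =====
-- stated objective: alternative
-- what changed: Decorate-sort-undecorate: instead of splitting into blocks and sorting each block's body, B computes a schedule key for every instruction from purely local information (block counter bumped at label-after-body boundaries, category 0/1/2 for label/middle/terminator decided from the successor) and performs one global stable sort on the keys.
import Mathlib
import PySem

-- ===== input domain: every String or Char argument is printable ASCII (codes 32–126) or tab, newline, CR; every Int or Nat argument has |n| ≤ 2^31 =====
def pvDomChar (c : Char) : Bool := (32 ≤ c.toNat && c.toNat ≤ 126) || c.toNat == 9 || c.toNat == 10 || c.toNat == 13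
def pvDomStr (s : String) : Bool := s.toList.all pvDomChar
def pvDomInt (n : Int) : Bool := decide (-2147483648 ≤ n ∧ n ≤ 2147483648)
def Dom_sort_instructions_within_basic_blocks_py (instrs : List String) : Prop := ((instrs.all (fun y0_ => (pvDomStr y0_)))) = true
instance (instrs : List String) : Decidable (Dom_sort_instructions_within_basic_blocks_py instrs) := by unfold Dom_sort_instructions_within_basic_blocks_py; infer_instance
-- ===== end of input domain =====

-- B replaces A's block-splitting + per-block sorting by decorate-sort-undecorate:
-- a local schedule key per instruction and ONE global stable sort (objective: alternative).

def pvTermPrefixes : List String :=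
  ["goto", "if-", "return", "return-void", "return-object", "return-wide", "throw", "NORM_SWITCH"]

-- l.startswith(":") — the label test both Pythons use
def pvIsLbl (l : String) : Bool := PySem.Str.startswith l ":"

-- s.startswith(_BB_TERMINATOR_PREFIXES) — the terminator test both Pythons use
def pvIsTerm (s : String) : Bool := pvTermPrefixes.any (fun p => PySem.Str.startswith s p)

-- ===== PORT A =====
-- one iteration of A's first loop: state = (blocks, cur)
def pvStepA (st : List (List String) × List String) (ins : String) :
    List (List String) × List String :=
  if pvIsLbl ins && !st.2.isEmpty && st.2.any (fun l => !pvIsLbl l) then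
    (st.1 ++ [st.2], [ins])
  else
    (st.1, st.2 ++ [ins])

-- A's second loop body: split a block into labels/body by filtering, sort the body
def pvProcessBlock (bb : List String) : List String :=
  let labels := bb.filter (fun l => pvIsLbl l)
  let body := bb.filter (fun l => !pvIsLbl l)
  match body.getLast? with
  | some last =>
      if pvIsTerm last then
        labels ++ PySem.List.sorted (PySem.List.slice body none (some (-1))) (fun x => x) false ++ [last]
      else
        labels ++ PySem.List.sorted body (fun x => x) false
  | none => labels ++ PySem.List.sorted body (fun x => x) false

def sort_instructions_within_basic_blocks_py (instrs : List String) : List String :=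
  let st := instrs.foldl pvStepA ([], [])
  let blocks := if st.2.isEmpty then st.1 else st.1 ++ [st.2]
  blocks.foldl (fun result bb => result ++ pvProcessBlock bb) []

-- ===== PORT B =====
-- one iteration of B's decoration loop: state = (decorated, block counter, previous
-- instruction was a body instruction); argument p = (ins, nxt) from the zip
def pvStepB (st : List ((Int × String) × String) × Int × Bool) (p : String × String) :
    List ((Int × String) × String) × Int × Bool :=
  let isLabel := pvIsLbl p.1
  let b := if isLabel && st.2.2 then st.2.1 + 1 else st.2.1
  let key : Int × String :=
    if isLabel then (3 * b, "")
    else if pvIsLbl p.2 && pvIsTerm p.1 then (3 * b + 2, "")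
    else (3 * b + 1, p.1)
  (st.1 ++ [(key, p.1)], b, !isLabel)

def sort_instructions_within_basic_blocks_py_alt (instrs : List String) : List String :=
  -- zip(instrs, instrs[1:] + [":end"])
  let pairs := instrs.zip (PySem.List.slice instrs (some 1) none ++ [":end"])
  let st := pairs.foldl pvStepB ([], 0, false)
  -- sorted(decorated, key=lambda t: t[0]) with the (int, str) tuple key, then undecorate
  (PySem.List.sorted2 st.1 (fun t => t.1.1) (fun t => t.1.2) false).map (fun t => t.2)

-- ===== PRECONDITION & SPEC =====
def Spec_sort_instructions_within_basic_blocks_py (instrs : List String) (out : List String) : Prop := out = sort_instructions_within_basic_blocks_py_alt instrs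
instance (instrs : List String) (out : List String) : Decidable (Spec_sort_instructions_within_basic_blocks_py instrs out) := by unfold Spec_sort_instructions_within_basic_blocks_py; infer_instance

-- ===== CLAIM (what is proved, stated in full; the proofs are below) =====
def Claim_equal_sort_instructions_within_basic_blocks_py : Prop := ∀ (instrs : List String), Dom_sort_instructions_within_basic_blocks_py instrs → Spec_sort_instructions_within_basic_blocks_py instrs (sort_instructions_within_basic_blocks_py instrs)

-- ===== LEMMAS AND PROOFS =====

-- B's lexicographic comparison on the decorated elements (what sorted2's key tuple compares)
def pvBefore (t u : (Int × String) × String) : Bool :=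
  decide (t.1.1 < u.1.1) || (!decide (u.1.1 < t.1.1) && decide (t.1.2 < u.1.2))

-- stable insertion sort by an abstract comparison (the engine inside PySem.List.sorted2)
def pvSortF {α : Type} (before : α → α → Bool) (xs : List α) : List α :=
  xs.foldl (fun acc x => PySem.List.insertBy before x acc) []

lemma pv_sorted2_eq_sortF (xs : List ((Int × String) × String)) :
    PySem.List.sorted2 xs (fun t => t.1.1) (fun t => t.1.2) false = pvSortF pvBefore xs := rfl

lemma pv_insertBy_pass {α : Type} (before : α → α → Bool) (x : α) (pre l : List α)
    (h : ∀ a ∈ pre, before x a = false) :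
    PySem.List.insertBy before x (pre ++ l) = pre ++ PySem.List.insertBy before x l := by
  induction pre with
  | nil => rfl
  | cons a pre ih =>
      simp only [List.cons_append, PySem.List.insertBy, h a (by simp)]
      simp [ih (fun a ha => h a (by simp [ha]))]

lemma pv_mem_foldl_insert {α : Type} (before : α → α → Bool) :
    ∀ (xs acc : List α) (a : α),
      a ∈ xs.foldl (fun acc x => PySem.List.insertBy before x acc) acc → a ∈ acc ∨ a ∈ xs := by
  intro xs
  induction xs with
  | nil => intro acc a h; exact Or.inl h
  | cons x xs ih =>
      intro acc a h
      rcases ih _ a h with h' | h'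
      · rcases (PySem.List.mem_insertBy before x a acc).mp h' with h'' | h''
        · exact Or.inr (by simp [h''])
        · exact Or.inl h''
      · exact Or.inr (by simp [h'])

lemma pv_foldl_insert_freeze {α : Type} (before : α → α → Bool) :
    ∀ (ys acc p : List α), (∀ y ∈ ys, ∀ a ∈ acc, before y a = false) →
      ys.foldl (fun acc x => PySem.List.insertBy before x acc) (acc ++ p)
        = acc ++ ys.foldl (fun acc x => PySem.List.insertBy before x acc) p := by
  intro ys
  induction ys with
  | nil => intro acc p _; rfl
  | cons y ys ih =>
      intro acc p h
      simp only [List.foldl_cons]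
      rw [pv_insertBy_pass before y acc p (h y (by simp))]
      exact ih acc _ (fun y' hy' => h y' (by simp [hy']))

lemma pv_sortF_append {α : Type} (before : α → α → Bool) (xs ys : List α)
    (h : ∀ y ∈ ys, ∀ x ∈ xs, before y x = false) :
    pvSortF before (xs ++ ys) = pvSortF before xs ++ pvSortF before ys := by
  unfold pvSortF
  rw [List.foldl_append]
  have h2 : ∀ y ∈ ys, ∀ a ∈ xs.foldl (fun acc x => PySem.List.insertBy before x acc) [], before y a = false := by
    intro y hy a ha
    rcases pv_mem_foldl_insert before xs [] a ha with h' | h'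
    · cases h'
    · exact h y hy a h'
  calc ys.foldl (fun acc x => PySem.List.insertBy before x acc)
          (xs.foldl (fun acc x => PySem.List.insertBy before x acc) [])
      = ys.foldl (fun acc x => PySem.List.insertBy before x acc)
          (xs.foldl (fun acc x => PySem.List.insertBy before x acc) [] ++ []) := by simp
    _ = _ := pv_foldl_insert_freeze before ys _ [] h2

lemma pv_foldl_insert_const {α : Type} (before : α → α → Bool) :
    ∀ (xs acc : List α), (∀ x ∈ xs, ∀ a ∈ acc, before x a = false) →
      (∀ x ∈ xs, ∀ y ∈ xs, before x y = false) →
      xs.foldl (fun acc x => PySem.List.insertBy before x acc) acc = acc ++ xs := by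
  intro xs
  induction xs with
  | nil => intro acc _ _; simp
  | cons x xs ih =>
      intro acc h1 h2
      simp only [List.foldl_cons]
      rw [PySem.List.insertBy_of_forall_not_before before x acc (h1 x (by simp))]
      rw [ih (acc ++ [x])
        (by intro x' hx' a ha
            rcases List.mem_append.mp ha with h | h
            · exact h1 x' (by simp [hx']) a h
            · rw [List.mem_singleton.mp h]; exact h2 x' (by simp [hx']) x (by simp))
        (by intro x' hx' y hy; exact h2 x' (by simp [hx']) y (by simp [hy]))]
      simp

lemma pv_sortF_const {α : Type} (before : α → α → Bool) (xs : List α)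
    (h : ∀ x ∈ xs, ∀ y ∈ xs, before x y = false) : pvSortF before xs = xs := by
  unfold pvSortF
  rw [pv_foldl_insert_const before xs [] (by intro x _ a ha; cases ha) h]
  simp

lemma pv_insertBy_map {α β : Type} (before : β → β → Bool) (f : α → β) (x : α) (acc : List α) :
    PySem.List.insertBy before (f x) (acc.map f)
      = (PySem.List.insertBy (fun a b => before (f a) (f b)) x acc).map f := by
  induction acc with
  | nil => rfl
  | cons a acc ih =>
      simp only [List.map_cons, PySem.List.insertBy]
      by_cases h : before (f x) (f a) = true
      · simp [h]
      · simp only [Bool.not_eq_true] at h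
        simp [h, ih]

lemma pv_foldl_insert_map {α β : Type} (before : β → β → Bool) (f : α → β) :
    ∀ (xs acc : List α),
      (xs.map f).foldl (fun acc x => PySem.List.insertBy before x acc) (acc.map f)
        = (xs.foldl (fun acc x => PySem.List.insertBy (fun a b => before (f a) (f b)) x acc) acc).map f := by
  intro xs
  induction xs with
  | nil => intro acc; rfl
  | cons x xs ih =>
      intro acc
      simp only [List.map_cons, List.foldl_cons]
      rw [pv_insertBy_map before f x acc]
      exact ih _

lemma pv_sortF_map {α β : Type} (before : β → β → Bool) (f : α → β) (xs : List α) :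
    pvSortF before (xs.map f) = (pvSortF (fun a b => before (f a) (f b)) xs).map f := by
  unfold pvSortF
  have := pv_foldl_insert_map before f xs []
  simpa using this

-- the three decoration shapes B's loop emits
def pvKey0 (b : Int) (l : String) : (Int × String) × String := ((3 * b, ""), l)
def pvKey1 (b : Int) (s : String) : (Int × String) × String := ((3 * b + 1, s), s)
def pvKey2 (b : Int) (s : String) : (Int × String) × String := ((3 * b + 2, ""), s)

-- decoration of a (possibly still open) block: labels L then body Bd; nl says whether
-- the instruction after Bd's last element is a label (i.e. whether the block is closed)
def pvDecOpen (b : Int) (L Bd : List String) (nl : Bool) : List ((Int × String) × String) :=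
  L.map (pvKey0 b) ++
  match Bd.getLast? with
  | none => []
  | some last =>
      if nl && pvIsTerm last then Bd.dropLast.map (pvKey1 b) ++ [pvKey2 b last]
      else Bd.map (pvKey1 b)

def pvDecBlk (b : Int) (bb : List String) : List ((Int × String) × String) :=
  pvDecOpen b (bb.filter (fun l => pvIsLbl l)) (bb.filter (fun l => !pvIsLbl l)) true

def pvDecAll (b : Int) (blocks : List (List String)) : List ((Int × String) × String) :=
  match blocks with
  | [] => []
  | bb :: r => pvDecBlk b bb ++ pvDecAll (b + 1) r

lemma pv_filter_lbl (L Bd : List String)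
    (hL : ∀ l ∈ L, pvIsLbl l = true) (hB : ∀ l ∈ Bd, pvIsLbl l = false) :
    (L ++ Bd).filter (fun l => pvIsLbl l) = L := by
  rw [List.filter_append, List.filter_eq_self.mpr hL,
      List.filter_eq_nil_iff.mpr (by intro a ha h; rw [hB a ha] at h; cases h),
      List.append_nil]

lemma pv_filter_body (L Bd : List String)
    (hL : ∀ l ∈ L, pvIsLbl l = true) (hB : ∀ l ∈ Bd, pvIsLbl l = false) :
    (L ++ Bd).filter (fun l => !pvIsLbl l) = Bd := by
  rw [List.filter_append,
      List.filter_eq_nil_iff.mpr (by intro a ha h; rw [hL a ha] at h; cases h),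
      List.filter_eq_self.mpr (by intro a ha; rw [hB a ha]; rfl),
      List.nil_append]

lemma pv_decOpen_true_eq_blk (b : Int) (L Bd : List String)
    (hL : ∀ l ∈ L, pvIsLbl l = true) (hB : ∀ l ∈ Bd, pvIsLbl l = false) :
    pvDecOpen b L Bd true = pvDecBlk b (L ++ Bd) := by
  unfold pvDecBlk
  rw [pv_filter_lbl L Bd hL hB, pv_filter_body L Bd hL hB]

lemma pv_decOpen_nil_body (b : Int) (L : List String) (nl : Bool) :
    pvDecOpen b L [] nl = L.map (pvKey0 b) := by
  simp [pvDecOpen]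

lemma pv_decOpen_false (b : Int) (L Bd : List String) :
    pvDecOpen b L Bd false = L.map (pvKey0 b) ++ Bd.map (pvKey1 b) := by
  unfold pvDecOpen
  cases h : Bd.getLast? with
  | none => rw [List.getLast?_eq_none_iff.mp h]; simp
  | some last => simp

lemma pv_decOpen_snoc (b : Int) (L Bd : List String) (ins : String) (nl : Bool) :
    pvDecOpen b L (Bd ++ [ins]) nl
      = pvDecOpen b L Bd false
        ++ [if nl && pvIsTerm ins then pvKey2 b ins else pvKey1 b ins] := by
  rw [pv_decOpen_false]
  unfold pvDecOpen
  rw [List.getLast?_concat]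
  by_cases h : (nl && pvIsTerm ins) = true
  · simp [h]
  · simp only [Bool.not_eq_true] at h
    simp [h]

lemma pv_decAll_append : ∀ (xs ys : List (List String)) (b : Int),
    pvDecAll b (xs ++ ys) = pvDecAll b xs ++ pvDecAll (b + xs.length) ys := by
  intro xs
  induction xs with
  | nil => intro ys b; simp [pvDecAll]
  | cons x xs ih =>
      intro ys b
      simp only [List.cons_append, pvDecAll]
      rw [ih ys (b + 1)]
      have : b + 1 + (xs.length : Int) = b + ((xs.length : Int) + 1) := by ring
      simp [this, List.append_assoc]

-- key-range facts used to split the global sort at group boundaries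
lemma pv_mem_decOpen_bounds (b : Int) (L Bd : List String) (nl : Bool)
    (x : (Int × String) × String) (hx : x ∈ pvDecOpen b L Bd nl) :
    3 * b ≤ x.1.1 ∧ x.1.1 ≤ 3 * b + 2 := by
  rcases List.eq_nil_or_concat Bd with rfl | ⟨mid, last, rfl⟩
  · rw [pv_decOpen_nil_body] at hx
    rcases List.mem_map.mp hx with ⟨l, _, rfl⟩
    simp [pvKey0]
  · simp only [pvDecOpen, List.concat_eq_append, List.getLast?_concat, List.dropLast_concat] at hx
    rcases List.mem_append.mp hx with h | h
    · rcases List.mem_map.mp h with ⟨l, _, rfl⟩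
      simp [pvKey0]
    · by_cases hc : (nl && pvIsTerm last) = true
      · rw [if_pos hc] at h
        rcases List.mem_append.mp h with h | h
        · rcases List.mem_map.mp h with ⟨s, _, rfl⟩
          simp [pvKey1]
        · rw [List.mem_singleton.mp h]; simp [pvKey2]
      · rw [if_neg hc] at h
        rcases List.mem_map.mp h with ⟨s, _, rfl⟩
        simp [pvKey1]

lemma pv_mem_decAll_lb : ∀ (blocks : List (List String)) (b : Int)
    (x : (Int × String) × String), x ∈ pvDecAll b blocks → 3 * b ≤ x.1.1 := by
  intro blocks
  induction blocks with
  | nil => intro b x hx; cases hx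
  | cons bb r ih =>
      intro b x hx
      rcases List.mem_append.mp hx with h | h
      · exact (pv_mem_decOpen_bounds b _ _ true x h).1
      · have := ih (b + 1) x h; omega

lemma pv_before_false_of_lt (x y : (Int × String) × String) (h : x.1.1 < y.1.1) :
    pvBefore y x = false := by
  unfold pvBefore
  rw [decide_eq_false (by omega : ¬ y.1.1 < x.1.1),
      decide_eq_true (by omega : x.1.1 < y.1.1)]
  simp

lemma pv_before_key0 (b : Int) (l l' : String) : pvBefore (pvKey0 b l) (pvKey0 b l') = false := by
  simp [pvBefore, pvKey0]

lemma pv_before_key1 (b : Int) (a c : String) :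
    pvBefore (pvKey1 b a) (pvKey1 b c) = decide (a < c) := by
  simp [pvBefore, pvKey1]

-- one block: the stable sort of its decoration, undecorated, is exactly A's processing
lemma pv_block_sort_core (b : Int) (labels body : List String) :
    (pvSortF pvBefore (pvDecOpen b labels body true)).map (fun t => t.2)
      = (match body.getLast? with
         | some last =>
             if pvIsTerm last then
               labels ++ PySem.List.sorted (PySem.List.slice body none (some (-1))) (fun x => x) false ++ [last]
             else
               labels ++ PySem.List.sorted body (fun x => x) false
         | none => labels ++ PySem.List.sorted body (fun x => x) false) := by
  have hm0 : (labels.map (pvKey0 b)).map (fun t => t.2) = labels := by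
    rw [List.map_map]; exact List.map_id labels
  have hsortL : pvSortF pvBefore (labels.map (pvKey0 b)) = labels.map (pvKey0 b) := by
    apply pv_sortF_const
    intro x hx y hy
    rcases List.mem_map.mp hx with ⟨l, _, rfl⟩
    rcases List.mem_map.mp hy with ⟨l', _, rfl⟩
    exact pv_before_key0 b l l'
  have hsort1 : ∀ bd : List String,
      (pvSortF pvBefore (bd.map (pvKey1 b))).map (fun t => t.2)
        = PySem.List.sorted bd (fun x => x) false := by
    intro bd
    rw [pv_sortF_map pvBefore (pvKey1 b) bd]
    have he : (fun a c => pvBefore (pvKey1 b a) (pvKey1 b c))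
        = (fun a c : String => decide (a < c)) := by
      funext a c; exact pv_before_key1 b a c
    rw [he, List.map_map]
    have h2 : ((fun t : (Int × String) × String => t.2) ∘ pvKey1 b) = (fun s : String => s) := rfl
    rw [h2, show (fun s : String => s) = @id String from rfl, List.map_id]
    rfl
  rcases List.eq_nil_or_concat body with rfl | ⟨mid, last, rfl⟩
  · rw [pv_decOpen_nil_body, hsortL, hm0]
    simp [PySem.List.sorted]
  · simp only [List.concat_eq_append]
    have hslice : PySem.List.slice (mid ++ [last]) none (some (-1)) = mid := by
      simp [PySem.List.slice]
    simp only [pvDecOpen, List.getLast?_concat, List.dropLast_concat, Bool.true_and, hslice]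
    by_cases hterm : pvIsTerm last = true
    · rw [if_pos hterm, if_pos hterm]
      rw [pv_sortF_append pvBefore _ _
        (by intro y hy x hx
            rcases List.mem_map.mp hx with ⟨l, _, rfl⟩
            apply pv_before_false_of_lt
            rcases List.mem_append.mp hy with h | h
            · rcases List.mem_map.mp h with ⟨s, _, rfl⟩
              simp [pvKey0, pvKey1]
            · rw [List.mem_singleton.mp h]
              simp [pvKey0, pvKey2])]
      rw [pv_sortF_append pvBefore _ _
        (by intro y hy x hx
            rcases List.mem_map.mp hx with ⟨s, _, rfl⟩
            rw [List.mem_singleton.mp hy]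
            apply pv_before_false_of_lt
            simp [pvKey1, pvKey2])]
      rw [hsortL]
      rw [show pvSortF pvBefore [pvKey2 b last] = [pvKey2 b last] from rfl]
      rw [List.map_append, List.map_append, hm0, hsort1 mid]
      simp [pvKey2]
    · rw [if_neg hterm, if_neg hterm]
      rw [pv_sortF_append pvBefore _ _
        (by intro y hy x hx
            rcases List.mem_map.mp hx with ⟨l, _, rfl⟩
            rcases List.mem_map.mp hy with ⟨s, _, rfl⟩
            apply pv_before_false_of_lt
            simp [pvKey0, pvKey1])]
      rw [hsortL, List.map_append, hm0, hsort1 (mid ++ [last])]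

lemma pv_block_sort (b : Int) (bb : List String) :
    (pvSortF pvBefore (pvDecBlk b bb)).map (fun t => t.2) = pvProcessBlock bb := by
  have := pv_block_sort_core b (bb.filter (fun l => pvIsLbl l)) (bb.filter (fun l => !pvIsLbl l))
  simpa [pvDecBlk, pvProcessBlock] using this

lemma pv_decAll_sort : ∀ (blocks : List (List String)) (b : Int),
    (pvSortF pvBefore (pvDecAll b blocks)).map (fun t => t.2)
      = blocks.flatMap pvProcessBlock := by
  intro blocks
  induction blocks with
  | nil => intro b; rfl
  | cons bb r ih =>
      intro b
      show (pvSortF pvBefore (pvDecBlk b bb ++ pvDecAll (b + 1) r)).map (fun t => t.2) = _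
      rw [pv_sortF_append pvBefore _ _
        (by intro y hy x hx
            apply pv_before_false_of_lt
            have h1 := (pv_mem_decOpen_bounds b _ _ true x hx).2
            have h2 := pv_mem_decAll_lb r (b + 1) y hy
            omega)]
      simp only [List.map_append]
      rw [pv_block_sort b bb, ih (b + 1)]
      simp [List.flatMap_cons]

lemma pv_lbl_end : pvIsLbl ":end" = true := by decide

lemma pv_zip_shift (ins : String) (rest : List String) (e : String) :
    (ins :: rest).zip ((ins :: rest).drop 1 ++ [e])
      = (ins, rest.headD e) :: rest.zip (rest.drop 1 ++ [e]) := by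
  cases rest <;> simp

-- the main invariant: B's streaming decoration tracks A's block construction
lemma pv_run : ∀ (rest : List String) (blocks : List (List String)) (L Bd : List String),
    (∀ l ∈ L, pvIsLbl l = true) → (∀ l ∈ Bd, pvIsLbl l = false) →
    ((rest.zip (rest.drop 1 ++ [":end"])).foldl pvStepB
        (pvDecAll 0 blocks ++ pvDecOpen (blocks.length : Int) L Bd (pvIsLbl (rest.headD ":end")),
         (blocks.length : Int), !Bd.isEmpty)).1
      = pvDecAll 0
          (let st := rest.foldl pvStepA (blocks, L ++ Bd)
           if st.2.isEmpty then st.1 else st.1 ++ [st.2]) := by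
  intro rest
  induction rest with
  | nil =>
      intro blocks L Bd hL hB
      simp only [List.zip_nil_left, List.foldl_nil, List.headD_nil, pv_lbl_end]
      by_cases h : (L ++ Bd) = []
      · rcases List.append_eq_nil_iff.mp h with ⟨rfl, rfl⟩
        simp [pv_decOpen_nil_body]
      · rw [if_neg (by simpa [List.isEmpty_iff] using h)]
        rw [pv_decAll_append blocks [L ++ Bd] 0]
        simp only [pvDecAll, List.append_nil, Int.zero_add]
        rw [pv_decOpen_true_eq_blk _ L Bd hL hB]
  | cons ins rest ih =>
      intro blocks L Bd hL hB
      rw [pv_zip_shift]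
      simp only [List.foldl_cons, List.headD_cons]
      by_cases hlbl : pvIsLbl ins = true
      · by_cases hBd : Bd = []
        · subst hBd
          have hstepB : pvStepB
              (pvDecAll 0 blocks ++ pvDecOpen (blocks.length : Int) L [] (pvIsLbl ins),
               (blocks.length : Int), !([] : List String).isEmpty) (ins, rest.headD ":end")
              = (pvDecAll 0 blocks
                  ++ pvDecOpen (blocks.length : Int) (L ++ [ins]) [] (pvIsLbl (rest.headD ":end")),
                 (blocks.length : Int), !pvIsLbl ins) := by
            simp only [pvStepB, hlbl, List.isEmpty_nil, Bool.and_false, if_false,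
              pv_decOpen_nil_body, if_true, Bool.not_true, Bool.false_eq_true]
            simp [pvKey0, List.map_append]
          rw [hstepB]
          have hstepA : pvStepA (blocks, L ++ []) ins = (blocks, (L ++ [ins]) ++ []) := by
            have hany : L.any (fun l => !pvIsLbl l) = false := by
              cases h : L.any (fun l => !pvIsLbl l)
              · rfl
              · rcases List.any_eq_true.mp h with ⟨x, hx, hxv⟩
                rw [hL x hx] at hxv; cases hxv
            simp only [pvStepA, List.append_nil]
            rw [if_neg (by rw [hany]; simp)]
          rw [hstepA]
          have := ih blocks (L ++ [ins]) []
            (by intro l hm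
                rcases List.mem_append.mp hm with h | h
                · exact hL l h
                · rw [List.mem_singleton.mp h]; exact hlbl)
            (by intro l h; cases h)
          simpa [hlbl] using this
        · -- boundary: a label after a non-empty body closes the block on both sides
          have hBne : Bd.isEmpty = false := by simpa [List.isEmpty_iff] using hBd
          have hstepB : pvStepB
              (pvDecAll 0 blocks ++ pvDecOpen (blocks.length : Int) L Bd (pvIsLbl ins),
               (blocks.length : Int), !Bd.isEmpty) (ins, rest.headD ":end")
              = ((pvDecAll 0 blocks ++ pvDecOpen (blocks.length : Int) L Bd true)
                  ++ [pvKey0 ((blocks.length : Int) + 1) ins],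
                 (blocks.length : Int) + 1, !pvIsLbl ins) := by
            simp only [pvStepB, hlbl, hBne, Bool.not_false, Bool.and_true, if_true]
            simp [pvKey0, List.append_assoc]
          rw [hstepB]
          have hstepA : pvStepA (blocks, L ++ Bd) ins = (blocks ++ [L ++ Bd], [ins]) := by
            have hany : (L ++ Bd).any (fun l => !pvIsLbl l) = true := by
              rcases List.exists_mem_of_ne_nil Bd hBd with ⟨x, hx⟩
              exact List.any_eq_true.mpr ⟨x, List.mem_append_right _ hx, by rw [hB x hx]; rfl⟩
            have hne : (L ++ Bd).isEmpty = false := by simp [hBd]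
            simp only [pvStepA]
            rw [if_pos (by rw [hlbl, hne, hany]; rfl)]
          rw [hstepA]
          have := ih (blocks ++ [L ++ Bd]) [ins] []
            (by intro l h; rw [List.mem_singleton.mp h]; exact hlbl)
            (by intro l h; cases h)
          rw [pv_decAll_append blocks [L ++ Bd] 0] at this
          simp only [pvDecAll, List.append_nil, Int.zero_add, List.length_append,
            List.length_cons, List.length_nil] at this
          rw [pv_decOpen_true_eq_blk _ L Bd hL hB]
          have hcast : ((blocks.length + 1 : Nat) : Int) = (blocks.length : Int) + 1 := by push_cast; ring
          rw [hcast] at this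
          simp only [pv_decOpen_nil_body, List.map_cons, List.map_nil] at this ⊢
          simpa [hlbl, List.append_assoc] using this
      · -- a body instruction: extend the open block on both sides
        have hlbl' : pvIsLbl ins = false := by
          cases h : pvIsLbl ins
          · rfl
          · exact absurd h hlbl
        have hstepB : pvStepB
            (pvDecAll 0 blocks ++ pvDecOpen (blocks.length : Int) L Bd (pvIsLbl ins),
             (blocks.length : Int), !Bd.isEmpty) (ins, rest.headD ":end")
            = (pvDecAll 0 blocks
                ++ pvDecOpen (blocks.length : Int) L (Bd ++ [ins]) (pvIsLbl (rest.headD ":end")),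
               (blocks.length : Int), true) := by
          simp only [pvStepB, hlbl', Bool.false_and, if_false, Bool.not_false, Bool.false_eq_true]
          rw [pv_decOpen_snoc]
          simp only [pvKey1, pvKey2, List.append_assoc]
          split <;> rfl
        rw [hstepB]
        have hstepA : pvStepA (blocks, L ++ Bd) ins = (blocks, L ++ (Bd ++ [ins])) := by
          simp only [pvStepA]
          rw [if_neg (by rw [hlbl']; simp)]
          simp [List.append_assoc]
        rw [hstepA]
        have := ih blocks L (Bd ++ [ins]) hL
          (by intro l h
              rcases List.mem_append.mp h with h | h
              · exact hB l h
              · rw [List.mem_singleton.mp h]; exact hlbl')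
        have hbe : (Bd ++ [ins]).isEmpty = false := by simp
        rw [hbe] at this
        simpa using this

-- ===== VERDICT (by name: the statement is the Claim_ definition above) =====
theorem sort_instructions_within_basic_blocks_py_spec : Claim_equal_sort_instructions_within_basic_blocks_py := by
  intro instrs _
  unfold Spec_sort_instructions_within_basic_blocks_py
  have hrun := pv_run instrs [] [] [] (by intro l h; cases h) (by intro l h; cases h)
  simp only [pvDecAll, List.nil_append, pv_decOpen_nil_body, List.map_nil,
    List.length_nil, Nat.cast_zero, List.isEmpty_nil, Bool.not_true] at hrun
  have hslice1 : PySem.List.slice instrs (some 1) none = instrs.drop 1 := by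
    rw [PySem.List.slice_from instrs (by norm_num : (0:Int) ≤ 1)]
    norm_num
  have hA : sort_instructions_within_basic_blocks_py instrs
      = (if (instrs.foldl pvStepA ([], [])).2.isEmpty
         then (instrs.foldl pvStepA ([], [])).1
         else (instrs.foldl pvStepA ([], [])).1 ++ [(instrs.foldl pvStepA ([], [])).2]).flatMap
          pvProcessBlock := by
    show ((if (instrs.foldl pvStepA ([], [])).2.isEmpty
           then (instrs.foldl pvStepA ([], [])).1
           else (instrs.foldl pvStepA ([], [])).1 ++ [(instrs.foldl pvStepA ([], [])).2]).foldl
            (fun result bb => result ++ pvProcessBlock bb) []) = _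
    rw [PySem.List.foldl_append_eq_flatMap pvProcessBlock _ []]
    simp
  have hB : sort_instructions_within_basic_blocks_py_alt instrs
      = ((PySem.List.sorted2
            ((instrs.zip (instrs.drop 1 ++ [":end"])).foldl pvStepB ([], 0, false)).1
            (fun t => t.1.1) (fun t => t.1.2) false).map (fun t => t.2)) := by
    show ((PySem.List.sorted2
            ((instrs.zip (PySem.List.slice instrs (some 1) none ++ [":end"])).foldl pvStepB ([], 0, false)).1
            (fun t => t.1.1) (fun t => t.1.2) false).map (fun t => t.2)) = _
    rw [hslice1]
  rw [hA, hB, pv_sorted2_eq_sortF, hrun, pv_decAll_sort _ 0]
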